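-- pv_equiv track=rewrite | github.com/leandroleonard/programming-skills | apointments/python/reverse.py | max_upper_left_submatrix
-- ===== SOURCE A (Python) =====
-- def max_upper_left_submatrix(matrix):
--     n = len(matrix) // 2
--     total = 0
--
--     for i in range(n):
--         for j in range(n):
--             val1 = matrix[i][j]
--             val2 = matrix[i][2*n-1-j]
--             val3 = matrix[2*n-1-i][j]
--             val4 = matrix[2*n-1-i][2*n-1-j]
--             total += max(val1, val2, val3, val4)
--
--     return total
-- ===== SOURCE B (Python) =====
-- def max_upper_left_submatrix(matrix):
--     # Single pass over every cell of the even-sized 2n x 2n block, grouping cells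
--     # by their canonical mirror position in a dict of running maxima, then summing.
--     m = len(matrix) - len(matrix) % 2
--     best = {}
--     for i in range(m):
--         row = matrix[i]
--         ci = min(i, m - 1 - i)
--         for j in range(m):
--             key = (ci, min(j, m - 1 - j))
--             v = row[j]
--             if key not in best or v > best[key]:
--                 best[key] = v
--     return sum(best.values())
-- ===== Notes on version B (the rewrite author's own statement) =====
-- stated objective: alternative
-- what changed: A loops over the n*n upper-left quadrant computing a 4-way max of the mirror cells and a running total; B makes a single pass over all cells of the even-sized 2n x 2n block, grouping cells by their canonical mirror position in a dict of running maxima, and returns the sum of the dict's values.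
import Mathlib
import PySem

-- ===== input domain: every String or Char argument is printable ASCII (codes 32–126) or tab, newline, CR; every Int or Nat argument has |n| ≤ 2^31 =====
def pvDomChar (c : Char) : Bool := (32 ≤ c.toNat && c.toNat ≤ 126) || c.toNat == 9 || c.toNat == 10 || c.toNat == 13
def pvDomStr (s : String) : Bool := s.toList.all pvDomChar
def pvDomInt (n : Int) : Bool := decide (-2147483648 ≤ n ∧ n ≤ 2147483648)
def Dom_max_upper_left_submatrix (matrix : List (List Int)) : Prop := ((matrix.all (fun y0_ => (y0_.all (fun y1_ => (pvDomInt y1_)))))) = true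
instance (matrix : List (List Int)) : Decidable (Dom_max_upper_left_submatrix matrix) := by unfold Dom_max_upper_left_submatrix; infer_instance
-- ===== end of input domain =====

-- B replaces A's per-cell 4-way-max double loop over the quadrant by a single pass over every
-- cell of the even-sized block, grouping cells by canonical mirror position in a dict of running
-- maxima and summing the dict's values; alternative decomposition, same cost.


-- ===== PORT A =====
-- literal port of A: n = len(matrix)//2; nested index loops accumulating max of the 4 mirror
-- cells. Indices are nonnegative and in range under Pre_, so getD is exact there.
def max_upper_left_submatrix (matrix : List (List Int)) : Int :=
  let n := matrix.length / 2
  (List.range n).foldl (fun total i =>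
    (List.range n).foldl (fun total j =>
      let val1 := (matrix.getD i []).getD j 0
      let val2 := (matrix.getD i []).getD (2*n-1-j) 0
      let val3 := (matrix.getD (2*n-1-i) []).getD j 0
      let val4 := (matrix.getD (2*n-1-i) []).getD (2*n-1-j) 0
      total + max (max (max val1 val2) val3) val4) total) 0

-- ===== PORT B =====
-- literal port of B: one pass over all cells of the even-sized m×m block (m = len - len%2),
-- dict 'best' of running maxima keyed by the canonical mirror position, then sum of its values.
-- 'key not in best' is get? = none; indices are nonnegative and in range under Pre_, so getD is exact there.
def max_upper_left_submatrix_alt (matrix : List (List Int)) : Int :=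
  let m := matrix.length - matrix.length % 2
  let best := (List.range m).foldl (fun d i =>
    let row := matrix.getD i []
    let ci := min i (m - 1 - i)
    (List.range m).foldl (fun d j =>
      let key := (ci, min j (m - 1 - j))
      let v := row.getD j 0
      match d.get? key with
      | none => d.insert key v
      | some cur => if v > cur then d.insert key v else d) d)
    (PySem.Dict.empty)
  best.values.sum

-- ===== PRECONDITION & SPEC =====
-- Pre_ excludes exactly the inputs where A raises IndexError: some row among the first
-- 2*(len//2) rows is shorter than 2*(len//2) (both programs index columns up to 2n-1 there).
def Pre_max_upper_left_submatrix (matrix : List (List Int)) : Prop :=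
  ∀ row ∈ matrix.take (2 * (matrix.length / 2)), 2 * (matrix.length / 2) ≤ row.length
instance (matrix : List (List Int)) : Decidable (Pre_max_upper_left_submatrix matrix) := by unfold Pre_max_upper_left_submatrix; infer_instance
def pvWitness_max_upper_left_submatrix : List (List Int) := [[1, 2], [3, 4]]
def Spec_max_upper_left_submatrix (matrix : List (List Int)) (out : Int) : Prop := out = max_upper_left_submatrix_alt matrix
instance (matrix : List (List Int)) (out : Int) : Decidable (Spec_max_upper_left_submatrix matrix out) := by unfold Spec_max_upper_left_submatrix; infer_instance

-- ===== CLAIM (what is proved, stated in full; the proofs are below) =====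
def Claim_equal_max_upper_left_submatrix : Prop := ∀ (matrix : List (List Int)), Dom_max_upper_left_submatrix matrix → Pre_max_upper_left_submatrix matrix → Spec_max_upper_left_submatrix matrix (max_upper_left_submatrix matrix)

-- ===== LEMMAS AND PROOFS =====

-- cell value matrix[i][j] as both ports read it
def pvVal (matrix : List (List Int)) (i j : Nat) : Int := (matrix.getD i []).getD j 0

-- the 4-way mirror max A computes per quadrant cell
def pvCell (matrix : List (List Int)) (n i j : Nat) : Int :=
  max (max (max (pvVal matrix i j) (pvVal matrix i (2*n-1-j)))
           (pvVal matrix (2*n-1-i) j))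
      (pvVal matrix (2*n-1-i) (2*n-1-j))

-- B's canonical key of cell (i, j) in the m×m block
def pvKey (m i j : Nat) : Nat × Nat := (min i (m-1-i), min j (m-1-j))

-- B's loop body as a function of one streamed (key, value) pair
def pvUpd (d : PySem.Dict (Nat × Nat) Int) (p : (Nat × Nat) × Int) : PySem.Dict (Nat × Nat) Int :=
  match d.get? p.1 with
  | none => d.insert p.1 p.2
  | some cur => if p.2 > cur then d.insert p.1 p.2 else d

-- running max on an optional current value, as pvUpd stores it
def pvOmax (o : Option Int) (v : Int) : Option Int :=
  some (match o with | none => v | some c => max c v)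

-- the row-major stream of (key, value) pairs B's two loops feed to pvUpd
def pvStream (matrix : List (List Int)) (m : Nat) : List ((Nat × Nat) × Int) :=
  (List.range m).flatMap (fun i => (List.range m).map (fun j => (pvKey m i j, pvVal matrix i j)))

-- A's nested '+=' loop is the nested sum of the per-cell values
lemma pvFoldl_foldl_add (f : Nat → Nat → Int) (n : Nat) :
    (List.range n).foldl (fun total i =>
      (List.range n).foldl (fun t j => t + f i j) total) 0
      = ((List.range n).map (fun i => ((List.range n).map (f i)).sum)).sum := by
  have h : (fun (total : Int) i => (List.range n).foldl (fun t j => t + f i j) total)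
      = fun total i => total + ((List.range n).map (f i)).sum := by
    funext total i
    exact PySem.List.foldl_add _ _ total
  rw [h, PySem.List.foldl_add, zero_add]

lemma pvA_eq (matrix : List (List Int)) :
    max_upper_left_submatrix matrix =
      ((List.range (matrix.length / 2)).map (fun i =>
        ((List.range (matrix.length / 2)).map (fun j =>
          pvCell matrix (matrix.length / 2) i j)).sum)).sum :=
  pvFoldl_foldl_add (fun i j => pvCell matrix (matrix.length / 2) i j) (matrix.length / 2)

-- B's two loops are the fold of pvUpd over the row-major stream
lemma pvAlt_eq (matrix : List (List Int)) :
    max_upper_left_submatrix_alt matrix =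
      ((pvStream matrix (matrix.length - matrix.length % 2)).foldl pvUpd PySem.Dict.empty).values.sum := by
  unfold max_upper_left_submatrix_alt pvStream
  rw [List.foldl_flatMap]
  simp only [List.foldl_map]
  rfl

-- one pvUpd step, seen through get?
lemma pvUpd_get? (d : PySem.Dict (Nat × Nat) Int) (p : (Nat × Nat) × Int) (k : Nat × Nat) :
    (pvUpd d p).get? k = if k = p.1 then pvOmax (d.get? p.1) p.2 else d.get? k := by
  unfold pvUpd
  cases h : d.get? p.1 with
  | none =>
    show (d.insert p.1 p.2).get? k = _
    rw [PySem.Dict.get?_insert]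
    simp [pvOmax]
  | some cur =>
    show (if p.2 > cur then d.insert p.1 p.2 else d).get? k = _
    by_cases hgt : p.2 > cur
    · rw [if_pos hgt, PySem.Dict.get?_insert]
      simp only [pvOmax]
      split_ifs with hk
      · rw [max_eq_right (le_of_lt hgt)]
      · rfl
    · rw [if_neg hgt]
      simp only [pvOmax]
      split_ifs with hk
      · subst hk
        rw [h, max_eq_left (le_of_not_gt hgt)]
      · rfl

-- one pvUpd step, seen through keys
lemma pvUpd_keys (d : PySem.Dict (Nat × Nat) Int) (p : (Nat × Nat) × Int) :
    (pvUpd d p).keys = if d.contains p.1 then d.keys else d.keys ++ [p.1] := by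
  unfold pvUpd
  cases h : d.get? p.1 with
  | none =>
    have hc : d.contains p.1 = false := by
      rw [PySem.Dict.contains_eq_isSome_get?, h]; rfl
    show (d.insert p.1 p.2).keys = _
    rw [hc, PySem.Dict.keys_insert_of_not_contains d p.2 hc]
    simp
  | some cur =>
    have hc : d.contains p.1 = true := by
      rw [PySem.Dict.contains_eq_isSome_get?, h]; rfl
    show (if p.2 > cur then d.insert p.1 p.2 else d).keys = _
    rw [hc, if_pos rfl]
    split_ifs with hgt
    · exact PySem.Dict.keys_insert_of_contains d p.2 hc
    · rfl

-- the fold's lookup at k is the running max of the values streamed at key k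
lemma pvFold_get? (ps : List ((Nat × Nat) × Int)) (d : PySem.Dict (Nat × Nat) Int) (k : Nat × Nat) :
    (ps.foldl pvUpd d).get? k
      = (ps.filter (fun p => p.1 == k)).foldl (fun o p => pvOmax o p.2) (d.get? k) := by
  induction ps generalizing d with
  | nil => rfl
  | cons p ps ih =>
    simp only [List.foldl_cons, List.filter_cons]
    rw [ih]
    by_cases hk : p.1 = k
    · rw [if_pos (by simp [hk]), List.foldl_cons, pvUpd_get?, if_pos hk.symm, hk]
    · rw [if_neg (by simp [hk]), pvUpd_get?, if_neg (Ne.symm hk)]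

-- keys stay unique through the fold
lemma pvFold_nodup (ps : List ((Nat × Nat) × Int)) (d : PySem.Dict (Nat × Nat) Int)
    (h : d.keys.Nodup) : ((ps.foldl pvUpd d).keys).Nodup := by
  induction ps generalizing d with
  | nil => exact h
  | cons p ps ih =>
    apply ih
    rw [pvUpd_keys]
    split_ifs with hc
    · exact h
    · have hmem : p.1 ∉ d.keys := by
        intro hm
        rw [← PySem.Dict.contains_iff_mem_keys] at hm
        simp [hc] at hm
      simp only [List.nodup_append, List.nodup_singleton, true_and]
      refine ⟨h, ?_⟩
      intro x hx y hy
      rw [List.mem_singleton] at hy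
      subst hy
      exact fun heq => hmem (heq ▸ hx)

-- the fold's keys are exactly the streamed keys plus the initial ones
lemma pvFold_mem_keys (ps : List ((Nat × Nat) × Int)) (d : PySem.Dict (Nat × Nat) Int) (k : Nat × Nat) :
    k ∈ (ps.foldl pvUpd d).keys ↔ k ∈ ps.map (·.1) ∨ k ∈ d.keys := by
  induction ps generalizing d with
  | nil => simp
  | cons p ps ih =>
    simp only [List.foldl_cons, List.map_cons, List.mem_cons]
    rw [ih, pvUpd_keys]
    split_ifs with hc
    · have hmem : p.1 ∈ d.keys := (PySem.Dict.contains_iff_mem_keys _ _).mp hc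
      constructor
      · tauto
      · rintro ((h | h) | h) <;> try tauto
        subst h
        tauto
    · simp only [List.mem_append, List.mem_singleton]
      tauto

-- a flatMap whose pieces vanish off p is the flatMap over the filtered list
lemma pvFlatMap_if {α : Type} (l : List Nat) (p : Nat → Bool) (h : Nat → List α) :
    l.flatMap (fun i => if p i = true then h i else []) = (l.filter p).flatMap h := by
  induction l with
  | nil => rfl
  | cons a l ih =>
    by_cases hp : p a = true <;> simp [hp, ih]

-- filtering range N down to two named elements
lemma pvFilter_range_pair (N a b : Nat) (hab : a < b) :
    (List.range N).filter (fun j => decide (j = a ∨ j = b)) =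
      (if a < N then [a] else []) ++ (if b < N then [b] else []) := by
  induction N with
  | zero => simp
  | succ N ih =>
    rw [List.range_succ, List.filter_append, ih, List.filter_singleton]
    by_cases hNa : N = a
    · rw [if_neg (by omega : ¬ a < N), if_neg (by omega : ¬ b < N),
        if_pos (by omega : a < N + 1), if_neg (by omega : ¬ b < N + 1)]
      simp [hNa]
    · by_cases hNb : N = b
      · rw [if_pos (by omega : a < N), if_neg (by omega : ¬ b < N),
          if_pos (by omega : a < N + 1), if_pos (by omega : b < N + 1)]
        simp [hNb]
      · have hno : ¬ (N = a ∨ N = b) := by omega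
        have ea : (a < N + 1) = (a < N) := propext (by omega)
        have eb : (b < N + 1) = (b < N) := propext (by omega)
        simp only [decide_eq_false hno, Bool.cond_false, List.append_nil, ea, eb]

-- the stream's entries at key (r, c) are exactly the 4 mirror cells, in row-major order
lemma pvStream_filter (matrix : List (List Int)) (m r c : Nat) (hm : m % 2 = 0)
    (hr : r < m / 2) (hc : c < m / 2) :
    (pvStream matrix m).filter (fun p => p.1 == (r, c)) =
      [((r, c), pvVal matrix r c), ((r, c), pvVal matrix r (m-1-c)),
       ((r, c), pvVal matrix (m-1-r) c), ((r, c), pvVal matrix (m-1-r) (m-1-c))] := by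
  unfold pvStream
  rw [List.filter_flatMap]
  have inner : ∀ i ∈ List.range m,
      ((List.range m).map (fun j => (pvKey m i j, pvVal matrix i j))).filter (fun p => p.1 == (r, c))
        = if decide (i = r ∨ i = m - 1 - r) = true then
            [(pvKey m i c, pvVal matrix i c), (pvKey m i (m-1-c), pvVal matrix i (m-1-c))]
          else [] := by
    intro i hi
    rw [List.mem_range] at hi
    rw [List.filter_map]
    have hpred : ∀ j ∈ List.range m,
        (((fun p => p.1 == (r, c)) ∘ (fun j => (pvKey m i j, pvVal matrix i j))) j)
          = (decide (i = r ∨ i = m - 1 - r) && decide (j = c ∨ j = m - 1 - c)) := by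
      intro j hj
      rw [List.mem_range] at hj
      apply Bool.eq_iff_iff.mpr
      simp only [Function.comp_apply, beq_iff_eq, Bool.and_eq_true, decide_eq_true_eq,
        pvKey, Prod.mk.injEq]
      omega
    rw [List.filter_congr hpred]
    by_cases hir : i = r ∨ i = m - 1 - r
    · have hfun : (fun j => decide (i = r ∨ i = m - 1 - r) && decide (j = c ∨ j = m - 1 - c))
          = (fun j => decide (j = c ∨ j = m - 1 - c)) := by
        funext j
        rw [decide_eq_true hir, Bool.true_and]
      rw [hfun, if_pos (decide_eq_true hir),
        pvFilter_range_pair m c (m - 1 - c) (by omega),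
        if_pos (by omega), if_pos (by omega)]
      simp
    · have hfun : (fun j => decide (i = r ∨ i = m - 1 - r) && decide (j = c ∨ j = m - 1 - c))
          = (fun _ => false) := by
        funext j
        rw [decide_eq_false hir, Bool.false_and]
      rw [hfun, if_neg (by simp [hir])]
      simp
  rw [List.flatMap_congr inner, pvFlatMap_if, pvFilter_range_pair m r (m - 1 - r) (by omega),
    if_pos (by omega), if_pos (by omega)]
  have k1 : min r (m-1-r) = r := by omega
  have k2 : min c (m-1-c) = c := by omega
  have k3 : min (m-1-r) (m-1-(m-1-r)) = r := by omega
  have k4 : min (m-1-c) (m-1-(m-1-c)) = c := by omega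
  simp [pvKey, k1, k2, k3, k4]

-- the dict's value at key (r, c) is the 4-way mirror max, in A's association order
lemma pvFold_getD (matrix : List (List Int)) (m r c : Nat) (hm : m % 2 = 0)
    (hr : r < m / 2) (hc : c < m / 2) :
    ((pvStream matrix m).foldl pvUpd PySem.Dict.empty).getD (r, c) 0
      = max (max (max (pvVal matrix r c) (pvVal matrix r (m-1-c)))
                 (pvVal matrix (m-1-r) c))
            (pvVal matrix (m-1-r) (m-1-c)) := by
  rw [PySem.Dict.getD_eq_get?_getD, pvFold_get?, PySem.Dict.get?_empty,
    pvStream_filter matrix m r c hm hr hc]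
  simp only [List.foldl_cons, List.foldl_nil, pvOmax, Option.getD_some]

-- the streamed keys are exactly the quadrant positions
lemma pvStream_mem_fst (matrix : List (List Int)) (m : Nat) (hm : m % 2 = 0) (r c : Nat) :
    (r, c) ∈ (pvStream matrix m).map (·.1) ↔ r < m / 2 ∧ c < m / 2 := by
  unfold pvStream
  rw [List.map_flatMap]
  simp only [List.map_map, List.mem_flatMap, List.mem_map, List.mem_range,
    Function.comp_apply, pvKey, Prod.mk.injEq]
  constructor
  · rintro ⟨i, hi, j, hj, h1, h2⟩
    omega
  · rintro ⟨h1, h2⟩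
    exact ⟨r, by omega, c, by omega, by omega, by omega⟩

-- sums over the flattened product are nested sums
lemma pvSum_product (n : Nat) (f : Nat → Nat → Int) :
    (((List.range n) ×ˢ (List.range n)).map (fun k => f k.1 k.2)).sum
      = ((List.range n).map (fun i => ((List.range n).map (f i)).sum)).sum := by
  show (((List.range n).flatMap (fun a => (List.range n).map (Prod.mk a))).map (fun k => f k.1 k.2)).sum = _
  rw [List.map_flatMap]
  rw [List.flatMap_def, List.sum_flatten, List.map_map]
  simp [Function.comp_def]

-- ===== VERDICT (by name: the statement is the Claim_ definition above) =====
theorem max_upper_left_submatrix_spec : Claim_equal_max_upper_left_submatrix := by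
  intro matrix _ _
  unfold Spec_max_upper_left_submatrix
  rw [pvA_eq, pvAlt_eq]
  have hm : (matrix.length - matrix.length % 2) % 2 = 0 := by omega
  have hn : (matrix.length - matrix.length % 2) / 2 = matrix.length / 2 := by omega
  set m := matrix.length - matrix.length % 2 with hmdef
  set n := matrix.length / 2 with hndef
  set F := (pvStream matrix m).foldl pvUpd PySem.Dict.empty with hF
  have hnodup : F.keys.Nodup := pvFold_nodup _ _ (by simp)
  rw [PySem.Dict.values_eq_map_keys F hnodup 0]
  have hperm : F.keys.Perm ((List.range n) ×ˢ (List.range n)) := by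
    rw [List.perm_ext_iff_of_nodup hnodup (List.nodup_range.product List.nodup_range)]
    rintro ⟨a, b⟩
    rw [pvFold_mem_keys, List.mem_product, pvStream_mem_fst matrix m hm a b]
    simp [List.mem_range, hn]
  rw [List.Perm.sum_eq (hperm.map (fun k => F.getD k 0))]
  have hpt : ∀ k ∈ (List.range n) ×ˢ (List.range n),
      F.getD k 0 = pvCell matrix n k.1 k.2 := by
    rintro ⟨a, b⟩ hk
    rw [List.mem_product, List.mem_range, List.mem_range] at hk
    rw [hF, pvFold_getD matrix m a b hm (by omega) (by omega)]
    unfold pvCell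
    have e1 : m - 1 - b = 2*n - 1 - b := by omega
    have e2 : m - 1 - a = 2*n - 1 - a := by omega
    rw [e1, e2]
  rw [List.map_congr_left hpt, pvSum_product n (fun i j => pvCell matrix n i j)]
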